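-- pv_equiv track=rewrite | github.com/herneri/share-vid | database.py | parse_video_name
-- ===== SOURCE A (Python) =====
-- def to_string(array):
-- 	string = ""
--
-- 	for char in array:
-- 		string += char
--
-- 	return string
--
-- def format_video_name(name, delimiter):
-- 	new_name = ""
--
-- 	for char in name:
-- 		if char == delimiter:
-- 			new_name += " "
-- 			continue
--
-- 		new_name += char
--
-- 	return new_name
--
-- def parse_video_name(video_name):
-- 	name = None
-- 	extension = None
-- 	year = None
-- 	path = video_name
--
-- 	buffer = []
-- 	ignore_delimiter = True
--
-- 	i = len(video_name) - 1
-- 	while i >= 0: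
-- 		if video_name[i] == '.' and ignore_delimiter == True:
-- 			if extension == None:
-- 				extension = to_string(buffer)
-- 			elif year == None:
-- 				year = to_string(buffer)
-- 				ignore_delimiter = False
--
-- 			buffer = []
-- 			i -= 1
-- 			continue
-- 		elif video_name[i] == '/':
-- 			if name == None:
-- 				name = format_video_name(to_string(buffer), '.')
-- 				break
--
-- 		buffer.insert(0, video_name[i])
-- 		i -= 1
--
-- 	return name, extension, year, path
-- ===== SOURCE B (Python) =====
-- def parse_video_name(video_name):
--     name = None
--     extension = None
--     year = None
--
--     slash = video_name.rfind('/')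
--     tail = video_name[slash + 1:]   # whole string when slash == -1
--
--     stem = tail
--     dot = stem.rfind('.')
--     if dot != -1:
--         extension = stem[dot + 1:]
--         stem = stem[:dot]
--         dot = stem.rfind('.')
--         if dot != -1:
--             year = stem[dot + 1:]
--             stem = stem[:dot]
--
--     if slash != -1:
--         name = stem.replace('.', ' ')
--
--     return name, extension, year, video_name
-- ===== Notes on version B (the rewrite author's own statement) =====
-- stated objective: faster
-- what changed: A runs a character-by-character right-to-left state machine that grows a buffer with buffer.insert(0, ...) and rebuilds it into strings, which is quadratic; B locates the last slash and the last two dots with rfind, cuts the pieces out with three slices, and maps dots to spaces with str.replace, in linear time.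
import Mathlib
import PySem

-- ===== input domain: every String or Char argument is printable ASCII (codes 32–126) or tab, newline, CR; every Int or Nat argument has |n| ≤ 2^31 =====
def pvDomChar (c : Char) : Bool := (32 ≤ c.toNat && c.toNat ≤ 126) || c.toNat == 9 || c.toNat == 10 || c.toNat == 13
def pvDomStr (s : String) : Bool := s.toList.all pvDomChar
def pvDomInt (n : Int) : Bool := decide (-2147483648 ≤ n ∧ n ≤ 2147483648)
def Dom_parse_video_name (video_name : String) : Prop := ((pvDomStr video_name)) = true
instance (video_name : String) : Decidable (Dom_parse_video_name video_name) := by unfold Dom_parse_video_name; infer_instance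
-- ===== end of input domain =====

-- B replaces A's quadratic character-by-character state machine (buffer.insert(0,..) + string rebuilds) by three rfind/slice splits and one replace; objective: faster (measured).

-- ===== PORT A =====
-- to_string(array): string built by += over the chars
def pvToString (array : List Char) : String :=
  array.foldl (fun s c => s.push c) ""

-- format_video_name(name, delimiter)
def pvFormatVideoName (name : String) (delimiter : Char) : String :=
  name.toList.foldl (fun s c => if c = delimiter then s.push ' ' else s.push c) ""

-- the while-loop of parse_video_name; fuel n = i + 1 (Python's i runs len-1 .. 0)
def parseLoopA (cs : List Char) : Nat → Option String → Option String → Option String →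
    List Char → Bool → Option String × Option String × Option String
  | 0, name, ext, year, _, _ => (name, ext, year)
  | n + 1, name, ext, year, buffer, ignore =>
    let c := cs.getD n ' '            -- video_name[i]; i = n is always in range here
    if c = '.' ∧ ignore then
      if ext = none then parseLoopA cs n name (some (pvToString buffer)) year [] ignore
      else if year = none then parseLoopA cs n name ext (some (pvToString buffer)) [] false
      else parseLoopA cs n name ext year [] ignore
    else if c = '/' then
      if name = none then (some (pvFormatVideoName (pvToString buffer) '.'), ext, year)  -- break
      else parseLoopA cs n name ext year (c :: buffer) ignore
    else parseLoopA cs n name ext year (c :: buffer) ignore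

def parse_video_name (video_name : String) : List (Option String) :=
  let cs := video_name.toList
  let r := parseLoopA cs cs.length none none none [] true
  [r.1, r.2.1, r.2.2, some video_name]

-- ===== PORT B =====
def parse_video_name_alt (video_name : String) : List (Option String) :=
  let slash := PySem.Str.rfind video_name "/"
  let tail := PySem.Str.slice video_name (some (slash + 1)) none
  let dot0 := PySem.Str.rfind tail "."
  if dot0 ≠ -1 then
    let extension := PySem.Str.slice tail (some (dot0 + 1)) none
    let stem1 := PySem.Str.slice tail none (some dot0)
    let dot1 := PySem.Str.rfind stem1 "."
    if dot1 ≠ -1 then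
      let year := PySem.Str.slice stem1 (some (dot1 + 1)) none
      let stem2 := PySem.Str.slice stem1 none (some dot1)
      [if slash ≠ -1 then some (PySem.Str.replace stem2 "." " ") else none,
       some extension, some year, some video_name]
    else
      [if slash ≠ -1 then some (PySem.Str.replace stem1 "." " ") else none,
       some extension, none, some video_name]
  else
    [if slash ≠ -1 then some (PySem.Str.replace tail "." " ") else none,
     none, none, some video_name]

-- ===== PRECONDITION & SPEC =====
def Spec_parse_video_name (video_name : String) (out : List (Option String)) : Prop := out = parse_video_name_alt video_name
instance (video_name : String) (out : List (Option String)) : Decidable (Spec_parse_video_name video_name out) := by unfold Spec_parse_video_name; infer_instance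

-- ===== CLAIM (what is proved, stated in full; the proofs are below) =====
def Claim_equal_parse_video_name : Prop := ∀ (video_name : String), Dom_parse_video_name video_name → Spec_parse_video_name video_name (parse_video_name video_name)

-- ===== LEMMAS AND PROOFS =====

-- predicates: pS = "not a slash", pD = "not a dot", pB = both
def pS (c : Char) : Bool := !(c == '/')
def pD (c : Char) : Bool := !(c == '.')
def pB (c : Char) : Bool := !(c == '.') && !(c == '/')

def dotSp (c : Char) : Char := if c = '.' then ' ' else c

-- middle spec: both ports equal this takeWhile/dropWhile description over the reversed char list
def Mspec (v : String) : List (Option String) :=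
  let rcs := v.toList.reverse
  let t := rcs.takeWhile pS
  let e := t.takeWhile pD
  let t2 := (t.dropWhile pD).tail
  let y := t2.takeWhile pD
  let t3 := (t2.dropWhile pD).tail
  let stem := if '.' ∈ t then (if '.' ∈ t2 then t3 else t2) else t
  let name := if '/' ∈ rcs then some (String.ofList (stem.reverse.map dotSp)) else none
  let ext := if '.' ∈ t then some (String.ofList e.reverse) else none
  let year := if '.' ∈ t2 then some (String.ofList y.reverse) else none
  [name, ext, year, some v]

-- ---------- generic string-builder facts ----------
theorem pvToString_toList (l : List Char) : (pvToString l).toList = l := by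
  
  have gen : ∀ (l : List Char) (s : String),
      (l.foldl (fun s c => s.push c) s).toList = s.toList ++ l := by
    intro l
    induction l with
    | nil => simp [List.foldl]
    | cons c t ih => intro s; simp [List.foldl, ih, String.toList_push]
  simpa using gen l ""

theorem pvFormatVideoName_toList (s : String) :
    (pvFormatVideoName s '.').toList = s.toList.map dotSp := by
  
  have gen : ∀ (l : List Char) (s : String),
      (l.foldl (fun s c => if c = '.' then s.push ' ' else s.push c) s).toList
        = s.toList ++ l.map dotSp := by
    intro l
    induction l with
    | nil => simp [List.foldl]
    | cons c t ih =>
      intro s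
      by_cases h : c = '.' <;>
        simp [List.foldl, h, ih, String.toList_push, dotSp]
  simpa [pvFormatVideoName] using gen s.toList ""

-- ---------- A side: loop over indices = recursion over the reversed list ----------
def goR : List Char → Option String → Option String → Option String →
    List Char → Bool → Option String × Option String × Option String
  | [], name, ext, year, _, _ => (name, ext, year)
  | c :: rest, name, ext, year, buffer, ignore =>
    if c = '.' ∧ ignore then
      if ext = none then goR rest name (some (pvToString buffer)) year [] ignore
      else if year = none then goR rest name ext (some (pvToString buffer)) [] false
      else goR rest name ext year [] ignore
    else if c = '/' then
      if name = none then (some (pvFormatVideoName (pvToString buffer) '.'), ext, year)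
      else goR rest name ext year (c :: buffer) ignore
    else goR rest name ext year (c :: buffer) ignore

theorem parseLoopA_eq_goR (cs : List Char) (n : Nat) (h : n ≤ cs.length)
    (name ext year : Option String) (buf : List Char) (ig : Bool) :
    parseLoopA cs n name ext year buf ig = goR ((cs.take n).reverse) name ext year buf ig := by
  
  induction n generalizing name ext year buf ig with
  | zero => simp [parseLoopA, goR]
  | succ n ih =>
    have hn : n < cs.length := h
    have hget : cs.getD n ' ' = cs[n] := by
      simp [List.getD, hn]
    have htake : (cs.take (n + 1)).reverse = cs[n] :: (cs.take n).reverse := by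
      rw [List.take_add_one]
      simp [hn]
    rw [htake]
    show (if cs.getD n ' ' = '.' ∧ ig then _ else _) = _
    rw [hget]
    simp only [parseLoopA, goR, hget]
    split_ifs <;> first
      | rfl
      | exact ih (Nat.le_of_lt hn) _ _ _ _ _

-- phase lemmas: goR from each of the three states of A's scanner
theorem goR_p3 (l : List Char) (buf : List Char) (e y : Option String) :
    goR l none e y buf false =
      (if '/' ∈ l then
        some (pvFormatVideoName (pvToString ((l.takeWhile pS).reverse ++ buf)) '.') else none,
       e, y) := by
  induction l generalizing buf with
  | nil => simp [goR]
  | cons c rest ih =>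
    by_cases hc : c = '/'
    · subst hc; simp [goR, pS]
    · simp only [goR, Bool.coe_false, and_false, if_false, if_neg hc]
      rw [ih]
      simp [pS, hc, Ne.symm hc, List.append_assoc]

theorem goR_p2_nil (l : List Char) (buf : List Char) (s : String) (h : l.dropWhile pB = []) :
    goR l none (some s) none buf true = (none, some s, none) := by
  induction l generalizing buf with
  | nil => simp [goR]
  | cons c rest ih =>
    rw [List.dropWhile_cons] at h
    by_cases hq : pB c = true
    · rw [if_pos hq] at h
      have hd : ¬ c = '.' := by intro hh; subst hh; simp [pB] at hq
      have hs : ¬ c = '/' := by intro hh; subst hh; simp [pB] at hq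
      simp only [goR, if_neg hs]
      rw [if_neg (show ¬(c = '.' ∧ True) by simp [hd])]
      exact ih _ h
    · rw [if_neg hq] at h
      simp at h

theorem goR_p2_dot (l rest : List Char) (buf : List Char) (s : String)
    (h : l.dropWhile pB = '.' :: rest) :
    goR l none (some s) none buf true =
      goR rest none (some s) (some (pvToString ((l.takeWhile pB).reverse ++ buf))) [] false := by
  induction l generalizing buf with
  | nil => simp at h
  | cons c rest' ih =>
    rw [List.dropWhile_cons] at h
    by_cases hq : pB c = true
    · rw [if_pos hq] at h
      have hd : ¬ c = '.' := by intro hh; subst hh; simp [pB] at hq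
      have hs : ¬ c = '/' := by intro hh; subst hh; simp [pB] at hq
      simp only [goR, if_neg hs]
      rw [if_neg (show ¬(c = '.' ∧ True) by simp [hd]), ih _ h]
      simp [hq, List.append_assoc]
    · rw [if_neg hq] at h
      obtain ⟨hc, hr⟩ := List.cons.inj h
      subst hc; subst hr
      simp [goR, List.takeWhile_cons, pB]

theorem goR_p2_slash (l rest : List Char) (buf : List Char) (s : String)
    (h : l.dropWhile pB = '/' :: rest) :
    goR l none (some s) none buf true =
      (some (pvFormatVideoName (pvToString ((l.takeWhile pB).reverse ++ buf)) '.'),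
       some s, none) := by
  induction l generalizing buf with
  | nil => simp at h
  | cons c rest' ih =>
    rw [List.dropWhile_cons] at h
    by_cases hq : pB c = true
    · rw [if_pos hq] at h
      have hd : ¬ c = '.' := by intro hh; subst hh; simp [pB] at hq
      have hs : ¬ c = '/' := by intro hh; subst hh; simp [pB] at hq
      simp only [goR, if_neg hs]
      rw [if_neg (show ¬(c = '.' ∧ True) by simp [hd]), ih _ h]
      simp [hq, List.append_assoc]
    · rw [if_neg hq] at h
      obtain ⟨hc, hr⟩ := List.cons.inj h
      subst hc
      simp [goR, List.takeWhile_cons, pB]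

theorem goR_p1_nil (l : List Char) (buf : List Char) (h : l.dropWhile pB = []) :
    goR l none none none buf true = (none, none, none) := by
  induction l generalizing buf with
  | nil => simp [goR]
  | cons c rest ih =>
    rw [List.dropWhile_cons] at h
    by_cases hq : pB c = true
    · rw [if_pos hq] at h
      have hd : ¬ c = '.' := by intro hh; subst hh; simp [pB] at hq
      have hs : ¬ c = '/' := by intro hh; subst hh; simp [pB] at hq
      simp only [goR, if_neg hs]
      rw [if_neg (show ¬(c = '.' ∧ True) by simp [hd])]
      exact ih _ h
    · rw [if_neg hq] at h
      simp at h

theorem goR_p1_dot (l rest : List Char) (buf : List Char) (h : l.dropWhile pB = '.' :: rest) :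
    goR l none none none buf true =
      goR rest none (some (pvToString ((l.takeWhile pB).reverse ++ buf))) none [] true := by
  induction l generalizing buf with
  | nil => simp at h
  | cons c rest' ih =>
    rw [List.dropWhile_cons] at h
    by_cases hq : pB c = true
    · rw [if_pos hq] at h
      have hd : ¬ c = '.' := by intro hh; subst hh; simp [pB] at hq
      have hs : ¬ c = '/' := by intro hh; subst hh; simp [pB] at hq
      simp only [goR, if_neg hs]
      rw [if_neg (show ¬(c = '.' ∧ True) by simp [hd]), ih _ h]
      simp [hq, List.append_assoc]
    · rw [if_neg hq] at h
      obtain ⟨hc, hr⟩ := List.cons.inj h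
      subst hc; subst hr
      simp [goR, List.takeWhile_cons, pB]

theorem goR_p1_slash (l rest : List Char) (buf : List Char) (h : l.dropWhile pB = '/' :: rest) :
    goR l none none none buf true =
      (some (pvFormatVideoName (pvToString ((l.takeWhile pB).reverse ++ buf)) '.'),
       none, none) := by
  induction l generalizing buf with
  | nil => simp at h
  | cons c rest' ih =>
    rw [List.dropWhile_cons] at h
    by_cases hq : pB c = true
    · rw [if_pos hq] at h
      have hd : ¬ c = '.' := by intro hh; subst hh; simp [pB] at hq
      have hs : ¬ c = '/' := by intro hh; subst hh; simp [pB] at hq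
      simp only [goR, if_neg hs]
      rw [if_neg (show ¬(c = '.' ∧ True) by simp [hd]), ih _ h]
      simp [hq, List.append_assoc]
    · rw [if_neg hq] at h
      obtain ⟨hc, hr⟩ := List.cons.inj h
      subst hc
      simp [goR, List.takeWhile_cons, pB]

-- ---------- glue facts between pB and pS/pD ----------
theorem glue_nil (l : List Char) (h : l.dropWhile pB = []) :
    l.takeWhile pS = l ∧ '/' ∉ l ∧ '.' ∉ l.takeWhile pS := by
  have hall := List.dropWhile_eq_nil_iff.mp h
  have htw : l.takeWhile pS = l := by
    refine List.takeWhile_eq_self_iff.mpr ?_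
    intro x hx
    have := hall x hx
    simp [pB, pS] at this ⊢
    exact this.2
  refine ⟨htw, ?_, ?_⟩
  · intro hm
    have := hall _ hm
    simp [pB] at this
  · rw [htw]
    intro hm
    have := hall _ hm
    simp [pB] at this

theorem glue_slash (l rest : List Char) (h : l.dropWhile pB = '/' :: rest) :
    l.takeWhile pS = l.takeWhile pB ∧ '/' ∈ l ∧ '.' ∉ l.takeWhile pS := by
  induction l with
  | nil => simp at h
  | cons c rest' ih =>
    rw [List.dropWhile_cons] at h
    by_cases hq : pB c = true
    · rw [if_pos hq] at h
      obtain ⟨h1, h2, h3⟩ := ih h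
      have hps : pS c = true := by simp [pB] at hq; simp [pS, hq.2]
      have hd : ¬ c = '.' := by simp [pB] at hq; exact hq.1
      have hs : ¬ c = '/' := by simp [pB] at hq; exact hq.2
      refine ⟨?_, ?_, ?_⟩
      · simp [List.takeWhile_cons, hps, hq, h1]
      · simp [h2]
      · simp [List.takeWhile_cons, hps, Ne.symm hd, h3]
    · rw [if_neg hq] at h
      obtain ⟨hc, hr⟩ := List.cons.inj h
      subst hc
      refine ⟨?_, by simp, ?_⟩
      · simp [List.takeWhile_cons, pS, pB]
      · simp [List.takeWhile_cons, pS]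

theorem glue_dot (l rest : List Char) (h : l.dropWhile pB = '.' :: rest) :
    (l.takeWhile pS).takeWhile pD = l.takeWhile pB ∧
    '.' ∈ l.takeWhile pS ∧
    ((l.takeWhile pS).dropWhile pD).tail = rest.takeWhile pS ∧
    ('/' ∈ l ↔ '/' ∈ rest) := by
  induction l with
  | nil => simp at h
  | cons c rest' ih =>
    rw [List.dropWhile_cons] at h
    by_cases hq : pB c = true
    · rw [if_pos hq] at h
      obtain ⟨h1, h2, h3, h4⟩ := ih h
      have hps : pS c = true := by simp [pB] at hq; simp [pS, hq.2]
      have hpd : pD c = true := by simp [pB] at hq; simp [pD, hq.1]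
      have hd : ¬ c = '.' := by simp [pB] at hq; exact hq.1
      have hs : ¬ c = '/' := by simp [pB] at hq; exact hq.2
      refine ⟨?_, ?_, ?_, ?_⟩
      · simp [List.takeWhile_cons, hps, hpd, hq, h1]
      · simp [List.takeWhile_cons, hps, h2]
      · simp [List.takeWhile_cons, List.dropWhile_cons, hps, hpd, h3]
      · simp [Ne.symm hs, h4]
    · rw [if_neg hq] at h
      obtain ⟨hc, hr⟩ := List.cons.inj h
      subst hc; subst hr
      refine ⟨?_, by simp [List.takeWhile_cons, pS], ?_, ?_⟩
      · simp [List.takeWhile_cons, pS, pD, pB]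
      · simp [List.takeWhile_cons, List.dropWhile_cons, pS, pD]
      · simp [List.takeWhile_cons, pS]

theorem pvToString_eq_ofList (l : List Char) : pvToString l = String.ofList l := by
  refine String.toList_inj.mp ?_
  rw [pvToString_toList]
  simp

theorem fmt_ofList (l : List Char) :
    pvFormatVideoName (String.ofList l) '.' = String.ofList (l.map dotSp) := by
  refine String.toList_inj.mp ?_
  rw [pvFormatVideoName_toList]
  simp

theorem mem_tail_dropWhile {x : Char} {p : Char → Bool} {l : List Char}
    (h : x ∈ (l.dropWhile p).tail) : x ∈ l :=
  (List.dropWhile_sublist p).subset ((List.tail_sublist _).subset h)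

theorem head_dropWhile_false {c : Char} {p : Char → Bool} {l rest : List Char}
    (h : l.dropWhile p = c :: rest) : p c = false := by
  have hh := List.head?_dropWhile_not p l
  rw [h] at hh
  simpa using hh

theorem A_eq_M (v : String) : parse_video_name v = Mspec v := by
  unfold parse_video_name Mspec
  simp only
  rw [parseLoopA_eq_goR _ _ le_rfl, List.take_length]
  rcases hd1 : (v.toList.reverse.dropWhile pB) with _ | ⟨c1, rest1⟩
  · obtain ⟨h1, h2, h3⟩ := glue_nil _ hd1
    have h4 : '.' ∉ ((v.toList.reverse.takeWhile pS).dropWhile pD).tail :=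
      fun hm => h3 (mem_tail_dropWhile hm)
    rw [goR_p1_nil _ _ hd1]
    simp [h2, h3, h4]
  · have hq : pB c1 = false := head_dropWhile_false hd1
    have hc1 : c1 = '.' ∨ c1 = '/' := by
      by_cases h : c1 = '.'
      · exact Or.inl h
      · simp [pB, h] at hq
        exact Or.inr hq
    rcases hc1 with rfl | rfl
    · -- first delimiter from the right is a dot: extension found
      obtain ⟨g1, g2, g3, g4⟩ := glue_dot _ _ hd1
      rw [goR_p1_dot _ _ _ hd1]
      rcases hd2 : (rest1.dropWhile pB) with _ | ⟨c2, rest2⟩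
      · obtain ⟨k1, k2, k3⟩ := glue_nil _ hd2
        rw [goR_p2_nil _ _ _ hd2]
        rw [g3] at *
        simp [g2, g4, k2, k3, g1, pvToString_eq_ofList]
      · have hq2 : pB c2 = false := head_dropWhile_false hd2
        have hc2 : c2 = '.' ∨ c2 = '/' := by
          by_cases h : c2 = '.'
          · exact Or.inl h
          · simp [pB, h] at hq2
            exact Or.inr hq2
        rcases hc2 with rfl | rfl
        · -- second dot: year found
          obtain ⟨m1, m2, m3, m4⟩ := glue_dot _ _ hd2
          rw [goR_p2_dot _ _ _ _ hd2, goR_p3]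
          rw [g3] at *
          simp [g2, g4, m2, m4, g1, m1, m3, pvToString_eq_ofList, fmt_ofList, List.map_reverse]
        · -- slash after one dot
          obtain ⟨k1, k2, k3⟩ := glue_slash _ _ hd2
          have k3' : '.' ∉ List.takeWhile pB rest1 := k1 ▸ k3
          rw [goR_p2_slash _ _ _ _ hd2]
          rw [g3] at *
          simp [g2, g4, k1, k2, k3', g1, pvToString_eq_ofList, fmt_ofList, List.map_reverse]
    · -- slash before any dot
      obtain ⟨h1, h2, h3⟩ := glue_slash _ _ hd1
      have h4 : '.' ∉ ((v.toList.reverse.takeWhile pS).dropWhile pD).tail :=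
        fun hm => h3 (mem_tail_dropWhile hm)
      have h3' : '.' ∉ List.takeWhile pB v.toList.reverse := h1 ▸ h3
      have h4' : '.' ∉ (List.dropWhile pD (List.takeWhile pB v.toList.reverse)).tail := h1 ▸ h4
      rw [goR_p1_slash _ _ _ hd1]
      simp [h1, h2, h3', h4', pvToString_eq_ofList, fmt_ofList, List.map_reverse]

-- ---------- B side: rfind / slice / replace on a single-char needle ----------

theorem go_zero (s : List Char) (c : Char) :
    PySem.Chars.rfind.go s [c] 0 = if [c].isPrefixOf s then 0 else -1 := rfl

theorem go_succ (s : List Char) (c : Char) (j : Nat) :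
    PySem.Chars.rfind.go s [c] (j + 1) =
      if [c].isPrefixOf (s.drop (j + 1)) then ((j : Int) + 1) else PySem.Chars.rfind.go s [c] j := rfl

theorem prefix_single (c : Char) (l : List Char) :
    [c].isPrefixOf l = (l.head? == some c) := by
  cases l with
  | nil => rfl
  | cons d t =>
    simp [List.isPrefixOf]
    exact eq_comm

theorem go_append (t : List Char) (a c : Char) (j : Nat) (hj : j < t.length) :
    PySem.Chars.rfind.go (t ++ [a]) [c] j = PySem.Chars.rfind.go t [c] j := by
  induction j with
  | zero =>
    rw [go_zero, go_zero, prefix_single, prefix_single]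
    cases t with
    | nil => simp at hj
    | cons d r => simp
  | succ j ih =>
    rw [go_succ, go_succ, ih (by omega)]
    have hdrop : (t ++ [a]).drop (j + 1) = t.drop (j + 1) ++ [a] := by
      rw [List.drop_append]
      simp [Nat.sub_eq_zero_of_le (by omega : j + 1 ≤ t.length)]
    rw [hdrop, prefix_single, prefix_single]
    have ht : t.drop (j + 1) ≠ [] := by
      simp [List.drop_eq_nil_iff]
      omega
    cases hdr : t.drop (j + 1) with
    | nil => exact absurd hdr ht
    | cons d r => simp

theorem rfind_snoc (t : List Char) (a c : Char) :
    PySem.Chars.rfind (t ++ [a]) [c] =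
      if a = c then (t.length : Int) else PySem.Chars.rfind t [c] := by
  have key : ∀ l : List Char, PySem.Chars.rfind l [c] = PySem.Chars.rfind.go l [c] l.length :=
    fun _ => rfl
  rw [key, show (t ++ [a]).length = t.length + 1 by simp, go_succ,
      show (t ++ [a]).drop (t.length + 1) = [] by simp [List.drop_eq_nil_iff],
      prefix_single]
  rw [show ((List.head? ([] : List Char)) == some c) = false from rfl, if_neg (by simp)]
  cases t with
  | nil =>
    simp only [List.nil_append, List.length_nil]
    rw [go_zero, prefix_single]
    by_cases h : a = c <;> simp [h, key, go_zero, prefix_single]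
  | cons d r =>
    rw [show (d :: r).length = r.length + 1 from rfl, go_succ,
        show ((d :: r) ++ [a]).drop (r.length + 1) = [a] by rw [List.drop_append]; simp,
        prefix_single]
    by_cases h : a = c
    · rw [show ((List.head? [a]) == some c) = true by simp [h], if_pos rfl, if_pos h]
      push_cast
      ring
    · rw [show ((List.head? [a]) == some c) = false by simp [h], if_neg (by simp),
          go_append _ _ _ _ (by simp : r.length < (d :: r).length), if_neg h, key,
          show (d :: r).length = r.length + 1 from rfl, go_succ,
          show (d :: r).drop (r.length + 1) = [] by simp [List.drop_eq_nil_iff],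
          prefix_single]
      simp

theorem takeWhile_eq_take (p : Char → Bool) (l : List Char) :
    l.takeWhile p = l.take (l.takeWhile p).length := by
  induction l with
  | nil => simp
  | cons c t ih => by_cases h : p c <;> simp [h] <;> exact ih

theorem tw_lt (c : Char) (l : List Char) (h : c ∈ l) :
    (l.takeWhile (fun x => !(x == c))).length + 1 ≤ l.length := by
  induction l with
  | nil => simp at h
  | cons d t ih =>
    by_cases hd : d = c
    · simp [hd]
    · have : c ∈ t := by
        rcases List.mem_cons.mp h with h1 | h1
        · exact absurd h1.symm hd
        · exact h1
      simp [hd]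
      exact ih this

theorem rfind_rev (s : List Char) (c : Char) :
    PySem.Chars.rfind s [c] =
      if c ∈ s then ((s.length - 1 - (s.reverse.takeWhile (fun x => !(x == c))).length : Nat) : Int)
      else -1 := by
  induction s using List.reverseRecOn with
  | nil => simp [PySem.Chars.rfind, go_zero, prefix_single]
  | append_singleton t a ih =>
    rw [rfind_snoc]
    by_cases h : a = c
    · subst h
      simp
    · rw [if_neg h, ih]
      have hrev : (t ++ [a]).reverse = a :: t.reverse := by simp
      rw [hrev]
      have hp : (fun x => !(x == c)) a = true := by simp [h]
      rw [List.takeWhile_cons, if_pos hp]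
      by_cases hm : c ∈ t
      · rw [if_pos hm, if_pos (by simp [hm])]
        congr 1
        simp
        omega
      · rw [if_neg hm, if_neg (by simp [hm, Ne.symm h])]

theorem slice_from_rfind (s : List Char) (c : Char) (h : c ∈ s) :
    PySem.List.slice s (some (PySem.Chars.rfind s [c] + 1)) none =
      (s.reverse.takeWhile (fun x => !(x == c))).reverse := by
  have hk := tw_lt c s.reverse (by simpa using h)
  rw [List.length_reverse] at hk
  rw [rfind_rev, if_pos h]
  have hcast : ((s.length - 1 - (s.reverse.takeWhile (fun x => !(x == c))).length : Nat) : Int) + 1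
      = ((s.length - (s.reverse.takeWhile (fun x => !(x == c))).length : Nat) : Int) := by
    omega
  rw [hcast, PySem.List.slice_from_natCast]
  rw [takeWhile_eq_take (fun x => !(x == c)) s.reverse, List.reverse_take]
  simp
  omega

theorem slice_to_rfind (s : List Char) (c : Char) (h : c ∈ s) :
    PySem.List.slice s none (some (PySem.Chars.rfind s [c])) =
      ((s.reverse.dropWhile (fun x => !(x == c))).tail).reverse := by
  have hk := tw_lt c s.reverse (by simpa using h)
  rw [List.length_reverse] at hk
  rw [rfind_rev, if_pos h, PySem.List.slice_to _ (by omega)]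
  have gen : ∀ l : List Char, l.dropWhile (fun x => !(x == c))
      = l.drop (l.takeWhile (fun x => !(x == c))).length := by
    intro l
    induction l with
    | nil => simp
    | cons d t ih => by_cases hp : d = c <;> simp [hp, ih]
  have hdw := gen s.reverse
  rw [hdw, List.tail_drop, List.reverse_drop]
  simp
  congr 1
  omega

theorem rep_zero (l acc : List Char) :
    PySem.Chars.replace.go ['.'] [' '] 0 l acc = acc.reverse ++ l := rfl
theorem rep_nil (f : Nat) (acc : List Char) :
    PySem.Chars.replace.go ['.'] [' '] (f + 1) [] acc = acc.reverse := rfl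
theorem rep_cons (f : Nat) (c : Char) (t acc : List Char) :
    PySem.Chars.replace.go ['.'] [' '] (f + 1) (c :: t) acc =
      if ['.'].isPrefixOf (c :: t) then PySem.Chars.replace.go ['.'] [' '] f t (' ' :: acc)
      else PySem.Chars.replace.go ['.'] [' '] f t (c :: acc) := rfl

theorem replace_single (s : List Char) :
    PySem.Chars.replace s ['.'] [' '] = s.map dotSp := by
  have gen : ∀ (f : Nat) (l acc : List Char), l.length ≤ f →
      PySem.Chars.replace.go ['.'] [' '] f l acc = acc.reverse ++ l.map dotSp := by
    intro f
    induction f with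
    | zero =>
      intro l acc h
      have : l = [] := List.length_eq_zero_iff.mp (Nat.le_zero.mp h)
      subst this
      simp [rep_zero]
    | succ f ih =>
      intro l acc h
      cases l with
      | nil => simp [rep_nil]
      | cons c t =>
        rw [rep_cons, prefix_single]
        by_cases hc : c = '.'
        · rw [if_pos (by simp [hc]), ih t _ (by simpa using h)]
          simp [hc, dotSp]
        · rw [if_neg (by simp [hc]), ih t _ (by simpa using h)]
          simp [hc, dotSp]
  show PySem.Chars.replace s ['.'] [' '] = _
  unfold PySem.Chars.replace
  rw [if_neg (by simp)]
  simpa using gen s.length s [] le_rfl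

theorem rfind_ne_neg_one (s : List Char) (c : Char) (h : c ∈ s) :
    PySem.Chars.rfind s [c] ≠ -1 := by
  rw [rfind_rev, if_pos h]
  omega

theorem str_slice_ofList (s : String) (a b : Option Int) :
    PySem.Str.slice s a b = String.ofList (PySem.List.slice s.toList a b) := rfl

theorem str_replace_map (s : String) :
    PySem.Str.replace s "." " " = String.ofList (s.toList.map dotSp) := by
  unfold PySem.Str.replace
  rw [show ("." : String).toList = ['.'] from rfl, show (" " : String).toList = [' '] from rfl,
      replace_single]

theorem B_eq_M (v : String) : parse_video_name_alt v = Mspec v := by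
  unfold parse_video_name_alt Mspec
  simp only
  simp only [PySem.Str.rfind_eq, show ("/" : String).toList = ['/'] from rfl,
    show ("." : String).toList = ['.'] from rfl]
  have hpD : (fun x : Char => !(x == '.')) = pD := rfl
  have hpS : (fun x : Char => !(x == '/')) = pS := rfl
  by_cases hS : '/' ∈ v.toList
  · have hS' : '/' ∈ v.toList.reverse := by simpa using hS
    have htail : PySem.Str.slice v (some (PySem.Chars.rfind v.toList ['/'] + 1)) none
        = String.ofList ((v.toList.reverse.takeWhile pS).reverse) := by
      rw [str_slice_ofList, slice_from_rfind v.toList '/' hS, hpS]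
    rw [htail]
    simp only [String.toList_ofList, List.reverse_reverse]
    by_cases hd1 : '.' ∈ v.toList.reverse.takeWhile pS
    · have hd1r : '.' ∈ (v.toList.reverse.takeWhile pS).reverse := by simpa using hd1
      rw [if_pos (rfind_ne_neg_one _ '.' hd1r)]
      simp only [str_slice_ofList, String.toList_ofList,
        slice_from_rfind _ '.' hd1r, slice_to_rfind _ '.' hd1r, List.reverse_reverse]
      by_cases hd2 : '.' ∈ ((v.toList.reverse.takeWhile pS).dropWhile (fun x => !(x == '.'))).tail
      · have hd2r : '.' ∈ ((v.toList.reverse.takeWhile pS).dropWhile (fun x => !(x == '.'))).tail.reverse := by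
          simpa using hd2
        rw [if_pos (rfind_ne_neg_one _ '.' hd2r)]
        simp only [str_slice_ofList, String.toList_ofList,
          slice_from_rfind _ '.' hd2r, slice_to_rfind _ '.' hd2r, List.reverse_reverse]
        rw [if_pos (rfind_ne_neg_one _ '/' hS)]
        have hd2' : '.' ∈ ((v.toList.reverse.takeWhile pS).dropWhile pD).tail := hd2
        simp [str_replace_map, hpD, hpS, hS', hd1, hd2', List.map_reverse, ← List.map_tail]
      · have hd2r : '.' ∉ ((v.toList.reverse.takeWhile pS).dropWhile (fun x => !(x == '.'))).tail.reverse := by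
          simpa using hd2
        rw [if_neg (by rw [rfind_rev, if_neg hd2r]; simp)]
        rw [if_pos (rfind_ne_neg_one _ '/' hS)]
        have hd2' : '.' ∉ ((v.toList.reverse.takeWhile pS).dropWhile pD).tail := hd2
        simp [str_replace_map, hpD, hpS, hS', hd1, hd2', List.map_reverse, ← List.map_tail]
    · have hd1r : '.' ∉ (v.toList.reverse.takeWhile pS).reverse := by simpa using hd1
      rw [if_neg (by rw [rfind_rev, if_neg hd1r]; simp)]
      rw [if_pos (rfind_ne_neg_one _ '/' hS)]
      have hd2 : '.' ∉ ((v.toList.reverse.takeWhile pS).dropWhile pD).tail :=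
        fun hm => hd1 (mem_tail_dropWhile hm)
      simp [str_replace_map, hpD, hpS, hS', hd1, hd2]
  · have hS' : '/' ∉ v.toList.reverse := by simpa using hS
    rw [rfind_rev v.toList '/', if_neg hS]
    have ht : v.toList.reverse.takeWhile pS = v.toList.reverse := by
      refine List.takeWhile_eq_self_iff.mpr ?_
      intro x hx
      simp [pS]
      intro hxx
      subst hxx
      exact hS' hx
    have htail : PySem.Str.slice v (some (-1 + 1)) none = String.ofList v.toList := by
      rw [str_slice_ofList]
      norm_num
    rw [htail]
    simp only [String.toList_ofList]
    by_cases hd1 : '.' ∈ v.toList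
    · have hd1r : '.' ∈ v.toList.reverse := by simpa using hd1
      rw [if_pos (rfind_ne_neg_one _ '.' hd1)]
      simp only [str_slice_ofList, String.toList_ofList,
        slice_from_rfind _ '.' hd1, slice_to_rfind _ '.' hd1, List.reverse_reverse]
      by_cases hd2 : '.' ∈ (v.toList.reverse.dropWhile (fun x => !(x == '.'))).tail
      · have hd2r : '.' ∈ (v.toList.reverse.dropWhile (fun x => !(x == '.'))).tail.reverse := by
          simpa using hd2
        rw [if_pos (rfind_ne_neg_one _ '.' hd2r)]
        simp only [str_slice_ofList, String.toList_ofList,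
          slice_from_rfind _ '.' hd2r, slice_to_rfind _ '.' hd2r, List.reverse_reverse]
        have hd2' : '.' ∈ (v.toList.reverse.dropWhile pD).tail := hd2
        simp [ht, hpD, hpS, hS', hd1r, hd2']
      · have hd2r : '.' ∉ (v.toList.reverse.dropWhile (fun x => !(x == '.'))).tail.reverse := by
          simpa using hd2
        rw [if_neg (by rw [rfind_rev, if_neg hd2r]; simp)]
        have hd2' : '.' ∉ (v.toList.reverse.dropWhile pD).tail := hd2
        simp [ht, hpD, hpS, hS', hd1r, hd2']
    · rw [rfind_rev, if_neg hd1]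
      have hd1' : '.' ∉ v.toList.reverse.takeWhile pS := by rw [ht]; simpa using hd1
      have hd2' : '.' ∉ ((v.toList.reverse.takeWhile pS).dropWhile pD).tail :=
        fun hm => hd1' (mem_tail_dropWhile hm)
      simp [hS', hd1', hd2']

-- ===== VERDICT (by name: the statement is the Claim_ definition above) =====
theorem parse_video_name_spec : Claim_equal_parse_video_name := by
  intro v _
  unfold Spec_parse_video_name
  rw [A_eq_M, B_eq_M]
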